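-- pv_equiv track=rewrite | github.com/Usmaelabdureman/Competitive_programming | Codeforces/Contest#9_ADWA_SPECIAL/A_Escaping_Prison.py | check
-- ===== SOURCE A (Python) =====
-- def check(n, h, blankets):
--     total_height = 0
--     for blanket in blankets:
--         if blanket[0 ] >= h or blanket[1] >= h:
--             return "YES"
--         total_height += max(blanket)
--         if total_height >= h:
--             return "YES"
--     return "NO"
-- ===== SOURCE B (Python) =====
-- def check(n, h, blankets):
--     # Pass 1: any single blanket tall enough by itself?
--     if any(b[0] >= h or b[1] >= h for b in blankets):
--         return "YES"
--     # Pass 2: precompute the prefix sums of the stacked heights, then scan them.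
--     total = 0
--     prefixes = []
--     for b in blankets:
--         total += max(b)
--         prefixes.append(total)
--     return "YES" if any(s >= h for s in prefixes) else "NO"
-- ===== Notes on version B (the rewrite author's own statement) =====
-- stated objective: alternative
-- what changed: Replaces A's single interleaved early-exit loop by two separate scans: one any() over the per-blanket test, then a precomputed prefix-sum table of max(b) scanned by a second any(); correctness relies on every early exit of A returning the same string 'YES'.
import Mathlib
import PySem

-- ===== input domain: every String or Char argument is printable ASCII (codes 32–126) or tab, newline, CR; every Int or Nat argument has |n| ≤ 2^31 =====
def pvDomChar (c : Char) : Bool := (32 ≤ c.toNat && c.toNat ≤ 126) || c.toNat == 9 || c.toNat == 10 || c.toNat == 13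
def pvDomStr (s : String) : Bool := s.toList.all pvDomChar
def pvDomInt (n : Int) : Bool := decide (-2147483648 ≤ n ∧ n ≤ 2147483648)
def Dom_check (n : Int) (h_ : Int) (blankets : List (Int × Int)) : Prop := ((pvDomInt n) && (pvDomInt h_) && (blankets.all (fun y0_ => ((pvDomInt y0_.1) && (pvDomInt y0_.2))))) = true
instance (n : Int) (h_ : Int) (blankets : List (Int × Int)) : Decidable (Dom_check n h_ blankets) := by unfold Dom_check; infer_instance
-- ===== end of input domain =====

-- B replaces A's interleaved early-exit loop with two separate scans over a precomputed
-- prefix-sum table; same O(n) cost, different decomposition (objective: alternative).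

-- ===== PORT A =====
-- the for-loop with early returns, carrying total_height
def checkLoop (h_ : Int) (bs : List (Int × Int)) (total : Int) : String :=
  match bs with
  | [] => "NO"
  | b :: rest =>
    if b.1 ≥ h_ || b.2 ≥ h_ then "YES"
    else
      let total' := total + max b.1 b.2
      if total' ≥ h_ then "YES" else checkLoop h_ rest total'

def check (n : Int) (h_ : Int) (blankets : List (Int × Int)) : String :=
  checkLoop h_ blankets 0

-- ===== PORT B =====
def check_alt (n : Int) (h_ : Int) (blankets : List (Int × Int)) : String :=
  if blankets.any (fun b => b.1 ≥ h_ || b.2 ≥ h_) then "YES"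
  else
    -- prefix-sum table built by the Source B loop (total, prefixes)
    let st := blankets.foldl (fun (st : Int × List Int) b =>
      (st.1 + max b.1 b.2, st.2 ++ [st.1 + max b.1 b.2])) (0, [])
    if st.2.any (fun s => s ≥ h_) then "YES" else "NO"

-- ===== PRECONDITION & SPEC =====
def Spec_check (n : Int) (h_ : Int) (blankets : List (Int × Int)) (out : String) : Prop := out = check_alt n h_ blankets
instance (n : Int) (h_ : Int) (blankets : List (Int × Int)) (out : String) : Decidable (Spec_check n h_ blankets out) := by unfold Spec_check; infer_instance

-- ===== CLAIM (what is proved, stated in full; the proofs are below) =====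
def Claim_equal_check : Prop := ∀ (n : Int) (h_ : Int) (blankets : List (Int × Int)), Dom_check n h_ blankets → Spec_check n h_ blankets (check n h_ blankets)

-- ===== LEMMAS AND PROOFS =====

-- the prefix sums of max b starting from offset t
def prefSums (t : Int) : List (Int × Int) → List Int
  | [] => []
  | b :: bs => (t + max b.1 b.2) :: prefSums (t + max b.1 b.2) bs

theorem foldl_prefixes (bs : List (Int × Int)) : ∀ (t : Int) (acc : List Int),
    bs.foldl (fun (st : Int × List Int) b =>
      (st.1 + max b.1 b.2, st.2 ++ [st.1 + max b.1 b.2])) (t, acc)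
      = (t + (bs.map (fun b => max b.1 b.2)).sum, acc ++ prefSums t bs) := by
  induction bs with
  | nil => intro t acc; simp [prefSums]
  | cons b bs ih =>
    intro t acc
    simp only [List.foldl_cons, ih, prefSums, List.map_cons, List.sum_cons]
    rw [Prod.mk.injEq]
    exact ⟨by ring, by simp⟩

theorem checkLoop_char (h_ : Int) (bs : List (Int × Int)) : ∀ (t : Int),
    checkLoop h_ bs t =
      if bs.any (fun b => b.1 ≥ h_ || b.2 ≥ h_) || (prefSums t bs).any (fun s => s ≥ h_)
      then "YES" else "NO" := by
  induction bs with
  | nil => intro t; simp [checkLoop, prefSums]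
  | cons b bs ih =>
    intro t
    simp only [checkLoop, List.any_cons, prefSums, ih]
    by_cases h1 : b.1 ≥ h_ || b.2 ≥ h_
    · simp [h1]
    · by_cases h2 : t + max b.1 b.2 ≥ h_
      · simp [h1, h2]
      · simp only [Bool.or_eq_true, decide_eq_true_eq, not_or] at h1
        rw [if_neg h2]
        simp only [decide_eq_false h1.1, decide_eq_false h1.2, decide_eq_false h2,
          Bool.false_or, Bool.or_false]
        simp

-- ===== VERDICT (by name: the statement is the Claim_ definition above) =====
theorem check_spec : Claim_equal_check := by
  intro n h_ blankets _
  show check n h_ blankets = check_alt n h_ blankets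
  simp only [check, check_alt, checkLoop_char, foldl_prefixes, List.nil_append]
  by_cases h1 : blankets.any (fun b => b.1 ≥ h_ || b.2 ≥ h_)
  · simp [h1]
  · by_cases h2 : (prefSums 0 blankets).any (fun s => s ≥ h_)
    · simp [h1, h2]
    · simp [h1, h2]
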